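-- pv_equiv track=rewrite | github.com/designrevolutions/git-summariser | main.py | infer_technologies_from_files
-- ===== SOURCE A (Python) =====
-- EXTENSION_TO_TECHNOLOGY = { # This is a mapping of common file extensions to the programming languages or technologies they are associated with. We will use this mapping to help identify the main technologies used in the project based on the file extensions present in the repository. This is a simple heuristic and may not be 100% accurate, but it can provide useful signals for our analysis.
--     ".py": "Python",
--     ".js": "JavaScript",
--     ".ts": "TypeScript",
--     ".tsx": "TypeScript",
--     ".jsx": "JavaScript",
--     ".java": "Java",
--     ".kt": "Kotlin",
--     ".rs": "Rust",
--     ".go": "Go",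
--     ".php": "PHP",
--     ".rb": "Ruby",
--     ".cpp": "C++",
--     ".cc": "C++",
--     ".cxx": "C++",
--     ".c": "C",
--     ".cs": "C#",
--     ".swift": "Swift",
--     ".scala": "Scala",
--     ".sh": "Shell",
--     ".sql": "SQL",
--     ".html": "HTML",
--     ".css": "CSS",
-- }
--
-- FILE_TECHNOLOGY_MAP: dict[str, set[str]] = {
--     "Python": {"requirements.txt", "pyproject.toml", "setup.py", "Pipfile"},
--     "Node.js": {"package.json"},
--     "Docker": {"dockerfile", "docker-compose.yml"},
--     "Rust": {"cargo.toml"},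
--     "Go": {"go.mod"},
--     "Java": {"pom.xml", "build.gradle"},
--     "PHP": {"composer.json"},
--     "Ruby": {"gemfile"},
--     "CMake": {"cmakelists.txt"},
--     "Make": {"makefile"},
-- }
--
-- def infer_technologies_from_files(
--         extensions: set[str],
--         important_files: set[str]
-- ) -> list[str]:
--     """
--     Infer likely technologies used in the repository based on file extensions
--     and important configuration/dependency files.
--
--     Args:
--         extensions:
--             Set of file extensions found in the repository.
--         important_files:
--             Set of important filenames found in the repository.
--
--     Returns:
--         Sorted list of inferred technologies.
--     """
--
--     detected_technologies = set()
--
--     for extension in extensions: # In the part, we see if we can find a match of our extensions to the technologies in our EXTENSION_TO_TECHNOLOGY mapping. This is a simple heuristic that can give us some signals about the main programming languages used in the project based on the file extensions present in the repository. For example, if we see a lot of .py files, it's a strong signal that the project uses Python. If we see .js and .jsx files, it's a strong signal that the project uses JavaScript and possibly React. This is not a perfect method, as some projects may use unconventional file extensions or have mixed technologies, but it can provide useful insights for our analysis.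
--         technology = EXTENSION_TO_TECHNOLOGY.get(extension)
--         if technology:
--             detected_technologies.add(technology)
--
--     lower_important_files = {file_name.lower() for file_name in important_files} # Reminder: important_files is a set of filenames found in the repository. We convert them to lowercase to ensure that our checks are case-insensitive, as some repositories may have files with different cases (e.g., "README.md" vs "readme.md"). By normalizing the filenames to lowercase, we can reliably check for the presence of important files regardless of their case in the actual repository.
--
--     # We can also add some heuristics based on important files. For example, if we see a 'package.json' file, it's a strong signal that the project uses Node.js, even if we didn't detect any .js files (e.g. if it's a monorepo with separate frontend/backend folders).
--     for technology, markers in FILE_TECHNOLOGY_MAP.items():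
--         if lower_important_files & markers: # The use of & is checking for an intersection between the set of important files found in the repository and the set of marker files associated with a particular technology. If there is any overlap (i.e., if the intersection of the two sets is not empty), it indicates that at least one of the marker files for that technology is present in the repository, which is a strong signal that the technology is being used. This allows us to infer the presence of certain technologies based on key configuration or dependency files, even if we don't see a large number of source code files with specific extensions.
--             detected_technologies.add(technology)
--
--     return sorted(detected_technologies)
-- ===== SOURCE B (Python) =====
-- EXTENSION_TO_TECHNOLOGY = {
--     ".py": "Python",
--     ".js": "JavaScript",
--     ".ts": "TypeScript",
--     ".tsx": "TypeScript",
--     ".jsx": "JavaScript",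
--     ".java": "Java",
--     ".kt": "Kotlin",
--     ".rs": "Rust",
--     ".go": "Go",
--     ".php": "PHP",
--     ".rb": "Ruby",
--     ".cpp": "C++",
--     ".cc": "C++",
--     ".cxx": "C++",
--     ".c": "C",
--     ".cs": "C#",
--     ".swift": "Swift",
--     ".scala": "Scala",
--     ".sh": "Shell",
--     ".sql": "SQL",
--     ".html": "HTML",
--     ".css": "CSS",
-- }
--
-- # Inverted index: each marker filename maps to its single technology
-- # (every marker is unique across FILE_TECHNOLOGY_MAP, so this is lossless).
-- MARKER_TO_TECHNOLOGY = {
--     "requirements.txt": "Python",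
--     "pyproject.toml": "Python",
--     "setup.py": "Python",
--     "Pipfile": "Python",
--     "package.json": "Node.js",
--     "dockerfile": "Docker",
--     "docker-compose.yml": "Docker",
--     "cargo.toml": "Rust",
--     "go.mod": "Go",
--     "pom.xml": "Java",
--     "build.gradle": "Java",
--     "composer.json": "PHP",
--     "gemfile": "Ruby",
--     "cmakelists.txt": "CMake",
--     "makefile": "Make",
-- }
--
-- def infer_technologies_from_files(extensions, important_files):
--     detected = {EXTENSION_TO_TECHNOLOGY[e] for e in extensions if e in EXTENSION_TO_TECHNOLOGY}
--     for file_name in important_files: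
--         technology = MARKER_TO_TECHNOLOGY.get(file_name.lower())
--         if technology is not None:
--             detected.add(technology)
--     return sorted(detected)
-- ===== Notes on version B (the rewrite author's own statement) =====
-- stated objective: idiomatic
-- what changed: Replaced the loop over FILE_TECHNOLOGY_MAP with set-intersections by a single pass over the important files themselves, looking each lowercased name up in a precomputed inverted index MARKER_TO_TECHNOLOGY; the extension pass became a set comprehension.
import Mathlib
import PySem

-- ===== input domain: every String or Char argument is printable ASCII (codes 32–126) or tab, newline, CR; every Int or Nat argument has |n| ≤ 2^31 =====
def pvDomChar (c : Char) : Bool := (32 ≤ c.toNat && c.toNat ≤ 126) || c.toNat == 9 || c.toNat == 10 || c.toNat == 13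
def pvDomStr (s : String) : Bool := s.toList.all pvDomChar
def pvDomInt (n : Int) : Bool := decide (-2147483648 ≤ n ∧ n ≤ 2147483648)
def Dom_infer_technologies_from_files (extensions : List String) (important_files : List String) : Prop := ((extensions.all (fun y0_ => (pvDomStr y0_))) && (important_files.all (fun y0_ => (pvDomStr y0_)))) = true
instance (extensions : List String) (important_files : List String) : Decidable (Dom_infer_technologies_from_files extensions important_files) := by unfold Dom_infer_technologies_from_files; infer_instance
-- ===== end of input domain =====

-- B replaces A's per-technology set-intersection loop by one pass over the important
-- files with an inverted marker→technology index (idiomatic rewrite, same results).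

-- ===== PORT A =====
def EXTENSION_TO_TECHNOLOGY : PySem.Dict String String := PySem.Dict.ofList
  [(".py", "Python"), (".js", "JavaScript"), (".ts", "TypeScript"), (".tsx", "TypeScript"),
   (".jsx", "JavaScript"), (".java", "Java"), (".kt", "Kotlin"), (".rs", "Rust"),
   (".go", "Go"), (".php", "PHP"), (".rb", "Ruby"), (".cpp", "C++"), (".cc", "C++"),
   (".cxx", "C++"), (".c", "C"), (".cs", "C#"), (".swift", "Swift"), (".scala", "Scala"),
   (".sh", "Shell"), (".sql", "SQL"), (".html", "HTML"), (".css", "CSS")]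

def FILE_TECHNOLOGY_MAP : List (String × PySem.Set String) :=
  [("Python", PySem.Set.ofList ["requirements.txt", "pyproject.toml", "setup.py", "Pipfile"]),
   ("Node.js", PySem.Set.ofList ["package.json"]),
   ("Docker", PySem.Set.ofList ["dockerfile", "docker-compose.yml"]),
   ("Rust", PySem.Set.ofList ["cargo.toml"]),
   ("Go", PySem.Set.ofList ["go.mod"]),
   ("Java", PySem.Set.ofList ["pom.xml", "build.gradle"]),
   ("PHP", PySem.Set.ofList ["composer.json"]),
   ("Ruby", PySem.Set.ofList ["gemfile"]),
   ("CMake", PySem.Set.ofList ["cmakelists.txt"]),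
   ("Make", PySem.Set.ofList ["makefile"])]

-- 'if technology:' — get returns None for a miss; the ported total form 'getD "" ' merges
-- the two falsy cases (None and ""), which is exact for string truthiness.
def infer_technologies_from_files (extensions : List String) (important_files : List String) : List String :=
  let detected : PySem.Set String := extensions.foldl (fun d extension =>
      let technology := EXTENSION_TO_TECHNOLOGY.getD extension ""
      if technology ≠ "" then PySem.Set.add d technology else d) PySem.Set.empty
  let lower_important_files : PySem.Set String :=
      PySem.Set.ofList (important_files.map PySem.Str.lower)
  let detected2 : PySem.Set String := FILE_TECHNOLOGY_MAP.foldl (fun d p =>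
      if PySem.Set.inter lower_important_files p.2 ≠ [] then PySem.Set.add d p.1 else d) detected
  PySem.List.sorted detected2 (fun x => x) false

-- ===== PORT B =====


def MARKER_TO_TECHNOLOGY : PySem.Dict String String := PySem.Dict.ofList
  [("requirements.txt", "Python"), ("pyproject.toml", "Python"), ("setup.py", "Python"),
   ("Pipfile", "Python"), ("package.json", "Node.js"), ("dockerfile", "Docker"),
   ("docker-compose.yml", "Docker"), ("cargo.toml", "Rust"), ("go.mod", "Go"),
   ("pom.xml", "Java"), ("build.gradle", "Java"), ("composer.json", "PHP"),
   ("gemfile", "Ruby"), ("cmakelists.txt", "CMake"), ("makefile", "Make")]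

def infer_technologies_from_files_alt (extensions : List String) (important_files : List String) : List String :=
  let detected : PySem.Set String :=
      PySem.Set.ofList (extensions.filterMap (fun e => EXTENSION_TO_TECHNOLOGY.get? e))
  let detected2 : PySem.Set String := important_files.foldl (fun d file_name =>
      match MARKER_TO_TECHNOLOGY.get? (PySem.Str.lower file_name) with
      | some technology => PySem.Set.add d technology
      | none => d) detected
  PySem.List.sorted detected2 (fun x => x) false

-- ===== PRECONDITION & SPEC =====
def Spec_infer_technologies_from_files (extensions : List String) (important_files : List String) (out : List String) : Prop := out = infer_technologies_from_files_alt extensions important_files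
instance (extensions : List String) (important_files : List String) (out : List String) : Decidable (Spec_infer_technologies_from_files extensions important_files out) := by unfold Spec_infer_technologies_from_files; infer_instance

-- ===== CLAIM (what is proved, stated in full; the proofs are below) =====
def Claim_equal_infer_technologies_from_files : Prop := ∀ (extensions : List String) (important_files : List String), Dom_infer_technologies_from_files extensions important_files → Spec_infer_technologies_from_files extensions important_files (infer_technologies_from_files extensions important_files)

-- ===== LEMMAS AND PROOFS =====

-- A's extension loop: membership and nodup
theorem memA_ext (exts : List String) (d : PySem.Set String) (x : String) :
    x ∈ exts.foldl (fun d extension =>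
      let technology := EXTENSION_TO_TECHNOLOGY.getD extension ""
      if technology ≠ "" then PySem.Set.add d technology else d) d ↔
    x ∈ d ∨ ∃ e ∈ exts, EXTENSION_TO_TECHNOLOGY.getD e "" = x ∧ x ≠ "" := by
  induction exts generalizing d with
  | nil => simp
  | cons e es ih =>
    simp only [List.foldl_cons, ih]
    by_cases h : EXTENSION_TO_TECHNOLOGY.getD e "" ≠ "" <;>
      simp [h, PySem.Set.mem_add] <;> aesop

theorem nodupA_ext (exts : List String) (d : PySem.Set String) (hd : d.Nodup) :
    (exts.foldl (fun d extension =>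
      let technology := EXTENSION_TO_TECHNOLOGY.getD extension ""
      if technology ≠ "" then PySem.Set.add d technology else d) d).Nodup := by
  induction exts generalizing d with
  | nil => exact hd
  | cons e es ih =>
    simp only [List.foldl_cons]
    apply ih
    split <;> [exact PySem.Set.nodup_add _ _ hd; exact hd]

-- A's marker loop over FILE_TECHNOLOGY_MAP
theorem memA_ftm (L : List (String × PySem.Set String)) (lf : List String) (d : PySem.Set String) (x : String) :
    x ∈ L.foldl (fun d p =>
      if PySem.Set.inter lf p.2 ≠ [] then PySem.Set.add d p.1 else d) d ↔
    x ∈ d ∨ ∃ p ∈ L, p.1 = x ∧ PySem.Set.inter lf p.2 ≠ [] := by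
  induction L generalizing d with
  | nil => simp
  | cons p ps ih =>
    simp only [List.foldl_cons, ih]
    by_cases h : PySem.Set.inter lf p.2 ≠ [] <;>
      simp [h, PySem.Set.mem_add] <;> aesop

theorem nodupA_ftm (L : List (String × PySem.Set String)) (lf : List String) (d : PySem.Set String) (hd : d.Nodup) :
    (L.foldl (fun d p =>
      if PySem.Set.inter lf p.2 ≠ [] then PySem.Set.add d p.1 else d) d).Nodup := by
  induction L generalizing d with
  | nil => exact hd
  | cons p ps ih =>
    simp only [List.foldl_cons]
    apply ih
    split <;> [exact PySem.Set.nodup_add _ _ hd; exact hd]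

-- B's file loop
theorem memB_files (fs : List String) (d : PySem.Set String) (x : String) :
    x ∈ fs.foldl (fun d file_name =>
      match MARKER_TO_TECHNOLOGY.get? (PySem.Str.lower file_name) with
      | some technology => PySem.Set.add d technology
      | none => d) d ↔
    x ∈ d ∨ ∃ f ∈ fs, MARKER_TO_TECHNOLOGY.get? (PySem.Str.lower f) = some x := by
  induction fs generalizing d with
  | nil => simp
  | cons f fs ih =>
    simp only [List.foldl_cons, ih]
    cases h : MARKER_TO_TECHNOLOGY.get? (PySem.Str.lower f) <;>
      simp [h, PySem.Set.mem_add] <;> aesop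

theorem nodupB_files (fs : List String) (d : PySem.Set String) (hd : d.Nodup) :
    (fs.foldl (fun d file_name =>
      match MARKER_TO_TECHNOLOGY.get? (PySem.Str.lower file_name) with
      | some technology => PySem.Set.add d technology
      | none => d) d).Nodup := by
  induction fs generalizing d with
  | nil => exact hd
  | cons f fs ih =>
    simp only [List.foldl_cons]
    apply ih
    split <;> [exact PySem.Set.nodup_add _ _ hd; exact hd]

theorem inter_ne_nil_iff (lf : List String) (t : PySem.Set String) :
    PySem.Set.inter lf t ≠ [] ↔ ∃ y ∈ lf, y ∈ t := by
  simp [PySem.Set.inter, List.filter_eq_nil_iff]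

theorem ext_getD_iff (e x : String) :
    (EXTENSION_TO_TECHNOLOGY.getD e "" = x ∧ x ≠ "") ↔ EXTENSION_TO_TECHNOLOGY.get? e = some x := by
  by_cases h : e ∈ ([".py",".js",".ts",".tsx",".jsx",".java",".kt",".rs",".go",".php",".rb",".cpp",".cc",".cxx",".c",".cs",".swift",".scala",".sh",".sql",".html",".css"] : List String)
  · fin_cases h
    · rw [show EXTENSION_TO_TECHNOLOGY.getD ".py" "" = "Python" from by decide,
           show EXTENSION_TO_TECHNOLOGY.get? ".py" = some "Python" from by decide]
      simp [eq_comm]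
      rintro rfl
      decide
    · rw [show EXTENSION_TO_TECHNOLOGY.getD ".js" "" = "JavaScript" from by decide,
           show EXTENSION_TO_TECHNOLOGY.get? ".js" = some "JavaScript" from by decide]
      simp [eq_comm]
      rintro rfl
      decide
    · rw [show EXTENSION_TO_TECHNOLOGY.getD ".ts" "" = "TypeScript" from by decide,
           show EXTENSION_TO_TECHNOLOGY.get? ".ts" = some "TypeScript" from by decide]
      simp [eq_comm]
      rintro rfl
      decide
    · rw [show EXTENSION_TO_TECHNOLOGY.getD ".tsx" "" = "TypeScript" from by decide,
           show EXTENSION_TO_TECHNOLOGY.get? ".tsx" = some "TypeScript" from by decide]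
      simp [eq_comm]
      rintro rfl
      decide
    · rw [show EXTENSION_TO_TECHNOLOGY.getD ".jsx" "" = "JavaScript" from by decide,
           show EXTENSION_TO_TECHNOLOGY.get? ".jsx" = some "JavaScript" from by decide]
      simp [eq_comm]
      rintro rfl
      decide
    · rw [show EXTENSION_TO_TECHNOLOGY.getD ".java" "" = "Java" from by decide,
           show EXTENSION_TO_TECHNOLOGY.get? ".java" = some "Java" from by decide]
      simp [eq_comm]
      rintro rfl
      decide
    · rw [show EXTENSION_TO_TECHNOLOGY.getD ".kt" "" = "Kotlin" from by decide,
           show EXTENSION_TO_TECHNOLOGY.get? ".kt" = some "Kotlin" from by decide]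
      simp [eq_comm]
      rintro rfl
      decide
    · rw [show EXTENSION_TO_TECHNOLOGY.getD ".rs" "" = "Rust" from by decide,
           show EXTENSION_TO_TECHNOLOGY.get? ".rs" = some "Rust" from by decide]
      simp [eq_comm]
      rintro rfl
      decide
    · rw [show EXTENSION_TO_TECHNOLOGY.getD ".go" "" = "Go" from by decide,
           show EXTENSION_TO_TECHNOLOGY.get? ".go" = some "Go" from by decide]
      simp [eq_comm]
      rintro rfl
      decide
    · rw [show EXTENSION_TO_TECHNOLOGY.getD ".php" "" = "PHP" from by decide,
           show EXTENSION_TO_TECHNOLOGY.get? ".php" = some "PHP" from by decide]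
      simp [eq_comm]
      rintro rfl
      decide
    · rw [show EXTENSION_TO_TECHNOLOGY.getD ".rb" "" = "Ruby" from by decide,
           show EXTENSION_TO_TECHNOLOGY.get? ".rb" = some "Ruby" from by decide]
      simp [eq_comm]
      rintro rfl
      decide
    · rw [show EXTENSION_TO_TECHNOLOGY.getD ".cpp" "" = "C++" from by decide,
           show EXTENSION_TO_TECHNOLOGY.get? ".cpp" = some "C++" from by decide]
      simp [eq_comm]
      rintro rfl
      decide
    · rw [show EXTENSION_TO_TECHNOLOGY.getD ".cc" "" = "C++" from by decide,
           show EXTENSION_TO_TECHNOLOGY.get? ".cc" = some "C++" from by decide]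
      simp [eq_comm]
      rintro rfl
      decide
    · rw [show EXTENSION_TO_TECHNOLOGY.getD ".cxx" "" = "C++" from by decide,
           show EXTENSION_TO_TECHNOLOGY.get? ".cxx" = some "C++" from by decide]
      simp [eq_comm]
      rintro rfl
      decide
    · rw [show EXTENSION_TO_TECHNOLOGY.getD ".c" "" = "C" from by decide,
           show EXTENSION_TO_TECHNOLOGY.get? ".c" = some "C" from by decide]
      simp [eq_comm]
      rintro rfl
      decide
    · rw [show EXTENSION_TO_TECHNOLOGY.getD ".cs" "" = "C#" from by decide,
           show EXTENSION_TO_TECHNOLOGY.get? ".cs" = some "C#" from by decide]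
      simp [eq_comm]
      rintro rfl
      decide
    · rw [show EXTENSION_TO_TECHNOLOGY.getD ".swift" "" = "Swift" from by decide,
           show EXTENSION_TO_TECHNOLOGY.get? ".swift" = some "Swift" from by decide]
      simp [eq_comm]
      rintro rfl
      decide
    · rw [show EXTENSION_TO_TECHNOLOGY.getD ".scala" "" = "Scala" from by decide,
           show EXTENSION_TO_TECHNOLOGY.get? ".scala" = some "Scala" from by decide]
      simp [eq_comm]
      rintro rfl
      decide
    · rw [show EXTENSION_TO_TECHNOLOGY.getD ".sh" "" = "Shell" from by decide,
           show EXTENSION_TO_TECHNOLOGY.get? ".sh" = some "Shell" from by decide]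
      simp [eq_comm]
      rintro rfl
      decide
    · rw [show EXTENSION_TO_TECHNOLOGY.getD ".sql" "" = "SQL" from by decide,
           show EXTENSION_TO_TECHNOLOGY.get? ".sql" = some "SQL" from by decide]
      simp [eq_comm]
      rintro rfl
      decide
    · rw [show EXTENSION_TO_TECHNOLOGY.getD ".html" "" = "HTML" from by decide,
           show EXTENSION_TO_TECHNOLOGY.get? ".html" = some "HTML" from by decide]
      simp [eq_comm]
      rintro rfl
      decide
    · rw [show EXTENSION_TO_TECHNOLOGY.getD ".css" "" = "CSS" from by decide,
           show EXTENSION_TO_TECHNOLOGY.get? ".css" = some "CSS" from by decide]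
      simp [eq_comm]
      rintro rfl
      decide
  · have h1 : EXTENSION_TO_TECHNOLOGY.getD e "" = "" := by
      apply PySem.Dict.getD_of_not_contains
      rw [PySem.Dict.contains_eq_decide_mem_keys, decide_eq_false_iff_not]
      intro hmem
      apply h
      have hks : EXTENSION_TO_TECHNOLOGY.keys = [".py",".js",".ts",".tsx",".jsx",".java",".kt",".rs",".go",".php",".rb",".cpp",".cc",".cxx",".c",".cs",".swift",".scala",".sh",".sql",".html",".css"] := by decide
      rwa [hks] at hmem
    have h2 : EXTENSION_TO_TECHNOLOGY.get? e = none := by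
      rw [PySem.Dict.get?_eq_none_iff_not_mem_keys]
      intro hmem
      apply h
      have hks : EXTENSION_TO_TECHNOLOGY.keys = [".py",".js",".ts",".tsx",".jsx",".java",".kt",".rs",".go",".php",".rb",".cpp",".cc",".cxx",".c",".cs",".swift",".scala",".sh",".sql",".html",".css"] := by decide
      rwa [hks] at hmem
    rw [h1, h2]
    constructor
    · rintro ⟨rfl, hne⟩; exact absurd rfl hne
    · intro hc; cases hc

theorem marker_iff (s x : String) :
    MARKER_TO_TECHNOLOGY.get? s = some x ↔ ∃ p ∈ FILE_TECHNOLOGY_MAP, p.1 = x ∧ s ∈ p.2 := by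
  by_cases h : s ∈ (["requirements.txt","pyproject.toml","setup.py","Pipfile","package.json","dockerfile","docker-compose.yml","cargo.toml","go.mod","pom.xml","build.gradle","composer.json","gemfile","cmakelists.txt","makefile"] : List String)
  · fin_cases h
    · rw [show MARKER_TO_TECHNOLOGY.get? "requirements.txt" = some "Python" from by decide]
      simp [FILE_TECHNOLOGY_MAP, PySem.Set.ofList, eq_comm]
    · rw [show MARKER_TO_TECHNOLOGY.get? "pyproject.toml" = some "Python" from by decide]
      simp [FILE_TECHNOLOGY_MAP, PySem.Set.ofList, eq_comm]
    · rw [show MARKER_TO_TECHNOLOGY.get? "setup.py" = some "Python" from by decide]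
      simp [FILE_TECHNOLOGY_MAP, PySem.Set.ofList, eq_comm]
    · rw [show MARKER_TO_TECHNOLOGY.get? "Pipfile" = some "Python" from by decide]
      simp [FILE_TECHNOLOGY_MAP, PySem.Set.ofList, eq_comm]
    · rw [show MARKER_TO_TECHNOLOGY.get? "package.json" = some "Node.js" from by decide]
      simp [FILE_TECHNOLOGY_MAP, PySem.Set.ofList, eq_comm]
    · rw [show MARKER_TO_TECHNOLOGY.get? "dockerfile" = some "Docker" from by decide]
      simp [FILE_TECHNOLOGY_MAP, PySem.Set.ofList, eq_comm]
    · rw [show MARKER_TO_TECHNOLOGY.get? "docker-compose.yml" = some "Docker" from by decide]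
      simp [FILE_TECHNOLOGY_MAP, PySem.Set.ofList, eq_comm]
    · rw [show MARKER_TO_TECHNOLOGY.get? "cargo.toml" = some "Rust" from by decide]
      simp [FILE_TECHNOLOGY_MAP, PySem.Set.ofList, eq_comm]
    · rw [show MARKER_TO_TECHNOLOGY.get? "go.mod" = some "Go" from by decide]
      simp [FILE_TECHNOLOGY_MAP, PySem.Set.ofList, eq_comm]
    · rw [show MARKER_TO_TECHNOLOGY.get? "pom.xml" = some "Java" from by decide]
      simp [FILE_TECHNOLOGY_MAP, PySem.Set.ofList, eq_comm]
    · rw [show MARKER_TO_TECHNOLOGY.get? "build.gradle" = some "Java" from by decide]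
      simp [FILE_TECHNOLOGY_MAP, PySem.Set.ofList, eq_comm]
    · rw [show MARKER_TO_TECHNOLOGY.get? "composer.json" = some "PHP" from by decide]
      simp [FILE_TECHNOLOGY_MAP, PySem.Set.ofList, eq_comm]
    · rw [show MARKER_TO_TECHNOLOGY.get? "gemfile" = some "Ruby" from by decide]
      simp [FILE_TECHNOLOGY_MAP, PySem.Set.ofList, eq_comm]
    · rw [show MARKER_TO_TECHNOLOGY.get? "cmakelists.txt" = some "CMake" from by decide]
      simp [FILE_TECHNOLOGY_MAP, PySem.Set.ofList, eq_comm]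
    · rw [show MARKER_TO_TECHNOLOGY.get? "makefile" = some "Make" from by decide]
      simp [FILE_TECHNOLOGY_MAP, PySem.Set.ofList, eq_comm]
  · have hk : MARKER_TO_TECHNOLOGY.get? s = none := by
      rw [PySem.Dict.get?_eq_none_iff_not_mem_keys]
      intro hmem
      apply h
      have hks : MARKER_TO_TECHNOLOGY.keys = ["requirements.txt","pyproject.toml","setup.py","Pipfile","package.json","dockerfile","docker-compose.yml","cargo.toml","go.mod","pom.xml","build.gradle","composer.json","gemfile","cmakelists.txt","makefile"] := by decide
      rwa [hks] at hmem
    rw [hk]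
    simp only [FILE_TECHNOLOGY_MAP]
    constructor
    · intro hc; cases hc
    · rintro ⟨p, hp, rfl, hs⟩
      exfalso
      fin_cases hp <;> simp_all [PySem.Set.ofList]

-- ===== VERDICT (by name: the statement is the Claim_ definition above) =====
theorem infer_technologies_from_files_spec : Claim_equal_infer_technologies_from_files := by
  intro exts files _
  unfold Spec_infer_technologies_from_files
  unfold infer_technologies_from_files infer_technologies_from_files_alt
  refine PySem.List.sorted_eq_sorted_of_perm _ _ (fun x => x) (fun _ _ h => h) ?_
  simp only [PySem.Set.empty]
  rw [List.perm_ext_iff_of_nodup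
        (nodupA_ftm _ _ _ (nodupA_ext _ _ List.nodup_nil))
        (nodupB_files _ _ (PySem.Set.nodup_ofList _))]
  intro x
  rw [memA_ftm, memB_files, memA_ext]
  simp only [PySem.Set.mem_ofList, List.mem_filterMap, List.mem_map, inter_ne_nil_iff,
    marker_iff, ← ext_getD_iff, List.not_mem_nil, false_or]
  constructor
  · rintro (⟨e, he, hx⟩ | ⟨p, hp, rfl, y, hy, hyp⟩)
    · exact Or.inl ⟨e, he, hx⟩
    · rcases hy with ⟨f, hf, rfl⟩
      exact Or.inr ⟨f, hf, p, hp, rfl, hyp⟩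
  · rintro (⟨e, he, hx⟩ | ⟨f, hf, p, hp, rfl, hyp⟩)
    · exact Or.inl ⟨e, he, hx⟩
    · exact Or.inr ⟨p, hp, rfl, PySem.Str.lower f, ⟨f, hf, rfl⟩, hyp⟩
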